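-- pv_equiv track=rewrite | github.com/Kundan547/DailyPython | PraticesQuestion/fab.py | replace_nines_with_fibonacci
-- ===== SOURCE A (Python) =====
-- def get_fibonacci_sequence(n):
--     """Generate first n numbers of Fibonacci sequence"""
--     fib = [0, 1]
--     for i in range(2, n):
--         fib.append(fib[i-1] + fib[i-2])
--     return fib
--
-- def replace_nines_with_fibonacci(number):
--     """
--     Replace each 9 in the input number with the next number
--     in the Fibonacci sequence (starting with 0,1,1,2,...)
--     """
--     # Convert number to string to process digits
--     num_str = str(number)
--
--     # Count how many 9's we need to replace
--     count_nines = num_str.count('9')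
--
--     # Get enough Fibonacci numbers
--     fib_sequence = get_fibonacci_sequence(count_nines)
--
--     # Replace each 9 with the corresponding Fibonacci number
--     result = ''
--     fib_index = 0
--
--     for digit in num_str:
--         if digit == '9':
--             result += str(fib_sequence[fib_index])
--             fib_index += 1
--         else:
--             result += digit
--
--     return int(result)
-- ===== SOURCE B (Python) =====
-- def replace_nines_with_fibonacci(number):
--     """
--     Replace each 9 in the input number with the next number
--     in the Fibonacci sequence (starting with 0,1,1,2,...)
--     """
--     a, b = 0, 1
--     result = ''
--     for digit in str(number):
--         if digit == '9':
--             result += str(a)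
--             a, b = b, a + b
--         else:
--             result += digit
--     return int(result)
-- ===== Notes on version B (the rewrite author's own statement) =====
-- stated objective: simpler
-- what changed: B is a single pass that streams Fibonacci numbers in two running variables while scanning the digits, removing A's separate count('9') pass, the precomputed Fibonacci table and the fib_index bookkeeping.
import Mathlib
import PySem

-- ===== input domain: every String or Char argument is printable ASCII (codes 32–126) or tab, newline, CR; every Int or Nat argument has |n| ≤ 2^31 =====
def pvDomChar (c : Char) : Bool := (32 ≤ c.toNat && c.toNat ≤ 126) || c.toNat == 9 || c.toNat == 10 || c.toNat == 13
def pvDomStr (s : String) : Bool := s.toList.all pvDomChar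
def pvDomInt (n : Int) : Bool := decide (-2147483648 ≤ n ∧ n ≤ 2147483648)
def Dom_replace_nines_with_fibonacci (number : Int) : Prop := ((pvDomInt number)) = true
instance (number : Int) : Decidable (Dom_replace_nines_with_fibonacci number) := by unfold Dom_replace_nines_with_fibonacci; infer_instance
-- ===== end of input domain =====

-- B replaces A's three phases (count the 9s, build a Fibonacci table, index into it)
-- by one pass with two running Fibonacci variables; same return value, objective: simpler.

-- ===== PORT A =====
def get_fibonacci_sequence (n : Int) : List Int :=
  (PySem.List.pyRange 2 n 1).foldl
    (fun fib i => fib ++ [PySem.List.pyGetD fib (i - 1) 0 + PySem.List.pyGetD fib (i - 2) 0])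
    [0, 1]

def replace_nines_with_fibonacci (number : Int) : Int :=
  let num_str := PySem.Int.toChars number
  let count_nines := PySem.Chars.count num_str ['9']
  let fib_sequence := get_fibonacci_sequence (count_nines : Int)
  let st := num_str.foldl
    (fun (st : List Char × Int) digit =>
      if digit = '9' then
        (st.1 ++ PySem.Int.toChars (PySem.List.pyGetD fib_sequence st.2 0), st.2 + 1)
      else
        (st.1 ++ [digit], st.2))
    ([], 0)
  (PySem.Int.ofChars? st.1).getD 0

-- ===== PORT B =====
def replace_nines_with_fibonacci_alt (number : Int) : Int :=
  let st := (PySem.Int.toChars number).foldl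
    (fun (st : List Char × Int × Int) digit =>
      if digit = '9' then
        (st.1 ++ PySem.Int.toChars st.2.1, st.2.2, st.2.1 + st.2.2)
      else
        (st.1 ++ [digit], st.2))
    ([], 0, 1)
  (PySem.Int.ofChars? st.1).getD 0

-- ===== PRECONDITION & SPEC =====
def Spec_replace_nines_with_fibonacci (number : Int) (out : Int) : Prop := out = replace_nines_with_fibonacci_alt number
instance (number : Int) (out : Int) : Decidable (Spec_replace_nines_with_fibonacci number out) := by unfold Spec_replace_nines_with_fibonacci; infer_instance

-- ===== CLAIM (what is proved, stated in full; the proofs are below) =====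
def Claim_equal_replace_nines_with_fibonacci : Prop := ∀ (number : Int), Dom_replace_nines_with_fibonacci number → Spec_replace_nines_with_fibonacci number (replace_nines_with_fibonacci number)

-- ===== LEMMAS AND PROOFS =====

/-- The mathematical Fibonacci sequence 0,1,1,2,3,5,… -/
def pvFib : Nat → Int
  | 0 => 0
  | 1 => 1
  | n + 2 => pvFib n + pvFib (n + 1)

/-- `s.count('9')` on a single-character needle is a plain character count. -/
theorem chars_count_singleton_go (l : List Char) :
    ∀ (fuel acc : Nat), l.length ≤ fuel →
      PySem.Chars.count.go ['9'] fuel l acc = acc + l.count '9' := by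
  induction l with
  | nil => intro fuel acc _; cases fuel <;> simp [PySem.Chars.count.go]
  | cons h t ih =>
    intro fuel acc hf
    cases fuel with
    | zero => simp at hf
    | succ fuel =>
      by_cases h9 : h = '9'
      · subst h9
        simp only [PySem.Chars.count.go, List.isPrefixOf, List.count_cons]
        rw [if_pos (by simp)]
        simp only [List.length_cons] at hf
        rw [show List.drop (['9'] : List Char).length ('9' :: t) = t by simp]
        rw [ih fuel (acc + 1) (by omega)]
        simp; omega
      · have hpref : (['9'].isPrefixOf (h :: t)) = false := by
          simp [List.isPrefixOf, Ne.symm h9]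
        simp only [PySem.Chars.count.go, hpref]
        simp only [List.length_cons] at hf
        rw [ih fuel acc (by omega)]
        simp [h9]

theorem chars_count_singleton (l : List Char) :
    PySem.Chars.count l ['9'] = l.count '9' := by
  have h := chars_count_singleton_go l l.length 0 le_rfl
  simp [PySem.Chars.count, h]

/-- A's table-building loop, unrolled: the list after `m` iterations is the first `2+m` Fibonacci numbers. -/
theorem fib_loop_eq (m : Nat) :
    (PySem.List.pyRange 2 (2 + (m : Int)) 1).foldl
      (fun fib i => fib ++ [PySem.List.pyGetD fib (i - 1) 0 + PySem.List.pyGetD fib (i - 2) 0])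
      [0, 1] = (List.range (2 + m)).map pvFib := by
  induction m with
  | zero =>
    rw [PySem.List.pyRange_one_eq_nil (by norm_num)]
    decide
  | succ m ih =>
    rw [show (2 + ((m + 1 : Nat) : Int)) = (2 + (m : Int)) + 1 by push_cast; ring,
        PySem.List.pyRange_one_succ_right (by omega), List.foldl_append, ih]
    simp only [List.foldl_cons, List.foldl_nil]
    have hlen : ((List.range (2 + m)).map pvFib).length = 2 + m := by simp
    have h1 : (2 + (m : Int)) - 1 = ((m + 1 : Nat) : Int) := by push_cast; ring
    have h2 : (2 + (m : Int)) - 2 = ((m : Nat) : Int) := by ring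
    rw [h1, h2, PySem.List.pyGetD_natCast, PySem.List.pyGetD_natCast]
    rw [List.getD_eq_getElem?_getD, List.getD_eq_getElem?_getD]
    simp only [List.getElem?_map, List.getElem?_range (show m + 1 < 2 + m by omega),
      List.getElem?_range (show m < 2 + m by omega), Option.map_some, Option.getD_some]
    rw [show 2 + (m + 1) = (2 + m) + 1 by ring, List.range_succ, List.map_append]
    simp [show pvFib (2 + m) = pvFib m + pvFib (m + 1) by rw [show 2 + m = m + 2 by ring]; rfl]
    ring

/-- A's Fibonacci table for a cast count `c` is the first `max 2 c` Fibonacci numbers. -/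
theorem get_fib_eq (c : Nat) :
    get_fibonacci_sequence (c : Int) = (List.range (max 2 c)).map pvFib := by
  unfold get_fibonacci_sequence
  by_cases h : c ≤ 2
  · rw [PySem.List.pyRange_one_eq_nil (by exact_mod_cast h)]
    rw [show max 2 c = 2 by omega]
    decide
  · have : c = 2 + (c - 2) := by omega
    rw [show (c : Int) = 2 + ((c - 2 : Nat) : Int) by omega, fib_loop_eq]
    rw [show max 2 c = 2 + (c - 2) by omega]

/-- Core invariant: A's indexed fold and B's streaming fold build the same string,
    provided the index plus the number of remaining 9s equals the table size. -/
theorem loop_eq (N : Nat) (cs : List Char) :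
    ∀ (acc : List Char) (idx : Nat), idx + cs.count '9' = N →
      (cs.foldl
        (fun (st : List Char × Int) digit =>
          if digit = '9' then
            (st.1 ++ PySem.Int.toChars (PySem.List.pyGetD ((List.range (max 2 N)).map pvFib) st.2 0), st.2 + 1)
          else
            (st.1 ++ [digit], st.2))
        (acc, (idx : Int))).1
      = (cs.foldl
        (fun (st : List Char × Int × Int) digit =>
          if digit = '9' then
            (st.1 ++ PySem.Int.toChars st.2.1, st.2.2, st.2.1 + st.2.2)
          else
            (st.1 ++ [digit], st.2))
        (acc, pvFib idx, pvFib (idx + 1))).1 := by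
  induction cs with
  | nil => intro acc idx _; rfl
  | cons c t ih =>
    intro acc idx hid
    by_cases h9 : c = '9'
    · subst h9
      simp only [List.foldl_cons, if_pos trivial]
      have hcnt : ('9' :: t).count '9' = t.count '9' + 1 := by simp
      have hlt : idx < max 2 N := by rw [hcnt] at hid; omega
      have hget : PySem.List.pyGetD ((List.range (max 2 N)).map pvFib) (idx : Int) 0 = pvFib idx := by
        rw [PySem.List.pyGetD_natCast, List.getD_eq_getElem?_getD]
        simp [List.getElem?_range hlt]
      rw [hget, show ((idx : Int) + 1) = ((idx + 1 : Nat) : Int) by omega]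
      rw [show pvFib idx + pvFib (idx + 1) = pvFib (idx + 1 + 1) by rfl]
      exact ih (acc ++ PySem.Int.toChars (pvFib idx)) (idx + 1) (by rw [hcnt] at hid; omega)
    · simp only [List.foldl_cons, if_neg h9]
      exact ih (acc ++ [c]) idx (by simpa [h9] using hid)

-- ===== VERDICT (by name: the statement is the Claim_ definition above) =====
theorem replace_nines_with_fibonacci_spec : Claim_equal_replace_nines_with_fibonacci := by
  intro number _
  unfold Spec_replace_nines_with_fibonacci replace_nines_with_fibonacci replace_nines_with_fibonacci_alt
  simp only
  set cs := PySem.Int.toChars number with hcs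
  have hc : PySem.Chars.count cs ['9'] = cs.count '9' := chars_count_singleton cs
  rw [hc, get_fib_eq (cs.count '9')]
  have := loop_eq (cs.count '9') cs [] 0 (by omega)
  simp only [Nat.cast_zero] at this
  rw [show pvFib 0 = 0 from rfl, show pvFib (0 + 1) = 1 from rfl] at this
  rw [this]
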